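-- pv_equiv track=rewrite | github.com/from-import/myCumtWorks | PythonExperiment/Task2.1.py | buy_chickens
-- ===== SOURCE A (Python) =====
-- def buy_chickens(A, B, C, X):
--     solutions = []
--     for cock in range(X + 1):
--         for hen in range(X + 1 - cock):
--             chicks = X - cock - hen
--             if chicks % C == 0 and (cock * A + hen * B + chicks // C) == X:
--                 solutions.append((cock, hen, chicks))
--     return solutions
--
-- A = 1
--
-- B = 2
--
-- C = 3
--
-- X = 100
--
-- solutions = buy_chickens(A, B, C, X)
-- ===== SOURCE B (Python) =====
-- def buy_chickens(A, B, C, X):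
--     solutions = []
--     for cock in range(X + 1):
--         n = X - cock
--         d = 1 - B * C
--         if d != 0:
--             # hen count is forced: q*(1 - B*C) = X - A*cock - B*n, chicks = q*C
--             num = X - A * cock - B * n
--             if num % d == 0:
--                 chicks = (num // d) * C
--                 if 0 <= chicks <= n:
--                     solutions.append((cock, n - chicks, chicks))
--         else:
--             # B*C == 1, so C = +/-1: every hen works iff A*cock + B*n == X
--             if A * cock + B * n == X:
--                 solutions.extend((cock, hen, n - hen) for hen in range(n + 1))
--     return solutions
-- ===== Notes on version B (the rewrite author's own statement) =====
-- stated objective: faster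
-- what changed: Instead of scanning every hen for each cock, B solves the linear equation per cock: the chick-group count q satisfies q*(1-B*C) = X - A*cock - B*(X-cock), so hen is computed in O(1) (with an explicit enumeration only in the degenerate case B*C == 1, where every hen works when the cost equation holds).
import Mathlib
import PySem

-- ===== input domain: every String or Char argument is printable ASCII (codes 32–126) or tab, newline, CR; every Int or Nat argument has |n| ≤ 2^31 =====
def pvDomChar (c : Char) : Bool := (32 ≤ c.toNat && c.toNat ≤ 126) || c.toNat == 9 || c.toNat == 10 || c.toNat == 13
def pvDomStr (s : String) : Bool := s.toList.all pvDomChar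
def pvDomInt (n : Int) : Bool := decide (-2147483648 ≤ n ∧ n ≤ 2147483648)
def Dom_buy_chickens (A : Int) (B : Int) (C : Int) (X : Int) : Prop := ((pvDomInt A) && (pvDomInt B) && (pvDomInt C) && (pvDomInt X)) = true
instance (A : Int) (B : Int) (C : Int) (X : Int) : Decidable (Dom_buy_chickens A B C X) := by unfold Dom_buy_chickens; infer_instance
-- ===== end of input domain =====

-- B replaces A's inner scan over hen by solving the linear equation per cock (asymptotically faster).

-- ===== PORT A =====
def buy_chickens (A : Int) (B : Int) (C : Int) (X : Int) : List (Int × Int × Int) :=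
  (PySem.List.pyRange 0 (X + 1) 1).foldl (fun solutions cock =>
    (PySem.List.pyRange 0 (X + 1 - cock) 1).foldl (fun solutions hen =>
      let chicks := X - cock - hen
      if PySem.Int.mod chicks C = 0 ∧ cock * A + hen * B + PySem.Int.floordiv chicks C = X
      then solutions ++ [(cock, hen, chicks)] else solutions) solutions) []

-- ===== PORT B =====
def buy_chickens_alt (A : Int) (B : Int) (C : Int) (X : Int) : List (Int × Int × Int) :=
  (PySem.List.pyRange 0 (X + 1) 1).foldl (fun solutions cock =>
    let n := X - cock
    let d := 1 - B * C
    if d ≠ 0 then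
      let num := X - A * cock - B * n
      if PySem.Int.mod num d = 0 then
        let chicks := (PySem.Int.floordiv num d) * C
        if 0 ≤ chicks ∧ chicks ≤ n then solutions ++ [(cock, n - chicks, chicks)] else solutions
      else solutions
    else
      if A * cock + B * n = X then
        solutions ++ (PySem.List.pyRange 0 (n + 1) 1).map (fun hen => (cock, hen, n - hen))
      else solutions) []

-- ===== PRECONDITION & SPEC =====
-- Pre_ excludes exactly C = 0 with X ≥ 0, where A raises ZeroDivisionError (chicks % 0).
def Pre_buy_chickens (A : Int) (B : Int) (C : Int) (X : Int) : Prop := C ≠ 0 ∨ X < 0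
instance (A : Int) (B : Int) (C : Int) (X : Int) : Decidable (Pre_buy_chickens A B C X) := by unfold Pre_buy_chickens; infer_instance
def pvWitness_buy_chickens : Int × Int × Int × Int := (1, 2, 3, 10)

def Spec_buy_chickens (A : Int) (B : Int) (C : Int) (X : Int) (out : List (Int × Int × Int)) : Prop := out = buy_chickens_alt A B C X
instance (A : Int) (B : Int) (C : Int) (X : Int) (out : List (Int × Int × Int)) : Decidable (Spec_buy_chickens A B C X out) := by unfold Spec_buy_chickens; infer_instance

-- ===== CLAIM (what is proved, stated in full; the proofs are below) =====
def Claim_equal_buy_chickens : Prop := ∀ (A : Int) (B : Int) (C : Int) (X : Int), Dom_buy_chickens A B C X → Pre_buy_chickens A B C X → Spec_buy_chickens A B C X (buy_chickens A B C X)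

-- ===== LEMMAS AND PROOFS =====

-- accumulate-if loop = acc ++ filtered, mapped list
theorem pv_foldl_app_ite {α β : Type} (p : α → Prop) [DecidablePred p] (f : α → β) :
    ∀ (l : List α) (acc : List β),
      l.foldl (fun s x => if p x then s ++ [f x] else s) acc
        = acc ++ (l.filter (fun x => decide (p x))).map f := by
  intro l
  induction l with
  | nil => intro acc; simp
  | cons a t ih =>
    intro acc
    by_cases h : p a <;> simp [List.foldl_cons, h, ih]

theorem pv_filter_eq_singleton {α : Type} (p : α → Bool) :
    ∀ (l : List α) (a : α), l.Nodup → a ∈ l → (∀ x ∈ l, (p x = true ↔ x = a)) →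
      l.filter p = [a] := by
  intro l
  induction l with
  | nil => intro a _ ha; simp at ha
  | cons b t ih =>
    intro a hnd hmem hiff
    rcases List.nodup_cons.mp hnd with ⟨hbt, hndt⟩
    rcases List.mem_cons.mp hmem with rfl | hat
    · have hpb : p a = true := (hiff a (by simp)).mpr rfl
      have : t.filter p = [] := by
        rw [List.filter_eq_nil_iff]
        intro x hx hpx
        exact hbt (((hiff x (by simp [hx])).mp hpx) ▸ hx)
      simp [hpb, this]
    · have hpb : ¬ p b = true := by
        intro hpb
        exact hbt ((hiff b (by simp)).mp hpb ▸ hat)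
      simp only [List.filter_cons, if_neg hpb]
      exact ih a hndt hat (fun x hx => hiff x (by simp [hx]))

theorem pv_exact_div (C q : Int) (hC : C ≠ 0) : PySem.Int.floordiv (C * q) C = q := by
  have h0 : PySem.Int.mod (C * q) C = 0 :=
    (PySem.Int.mod_eq_zero_iff_dvd _ _).mpr ⟨q, rfl⟩
  have h := PySem.Int.floordiv_mul_add_mod (C * q) C
  rw [h0, add_zero] at h
  have : PySem.Int.floordiv (C * q) C * C = q * C := by linarith [h]
  exact mul_right_cancel₀ hC this

-- the per-hen condition, solved: forced hen in the nondegenerate case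
theorem pv_key (A B C X cock hen : Int) (hC : C ≠ 0) (hd : 1 - B * C ≠ 0)
    (h0 : 0 ≤ hen) (h1 : hen ≤ X - cock) :
    (PySem.Int.mod (X - cock - hen) C = 0 ∧
      cock * A + hen * B + PySem.Int.floordiv (X - cock - hen) C = X)
    ↔ (PySem.Int.mod (X - A * cock - B * (X - cock)) (1 - B * C) = 0 ∧
        0 ≤ (PySem.Int.floordiv (X - A * cock - B * (X - cock)) (1 - B * C)) * C ∧
        (PySem.Int.floordiv (X - A * cock - B * (X - cock)) (1 - B * C)) * C ≤ X - cock ∧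
        hen = (X - cock) - (PySem.Int.floordiv (X - A * cock - B * (X - cock)) (1 - B * C)) * C) := by
  constructor
  · rintro ⟨hm, he⟩
    rcases (PySem.Int.mod_eq_zero_iff_dvd _ _).mp hm with ⟨q, hq⟩
    have hfd : PySem.Int.floordiv (X - cock - hen) C = q := by rw [hq]; exact pv_exact_div C q hC
    rw [hfd] at he
    have hnum : X - A * cock - B * (X - cock) = (1 - B * C) * q := by linear_combination -he - B * hq
    have hmod : PySem.Int.mod (X - A * cock - B * (X - cock)) (1 - B * C) = 0 :=
      (PySem.Int.mod_eq_zero_iff_dvd _ _).mpr ⟨q, hnum⟩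
    have hfd2 : PySem.Int.floordiv (X - A * cock - B * (X - cock)) (1 - B * C) = q := by
      rw [hnum]; exact pv_exact_div _ q hd
    rw [hmod, hfd2]
    refine ⟨rfl, by linarith [hq], by linarith [hq], by linarith [hq]⟩
  · rintro ⟨hmod, hlo, hhi, hhen⟩
    set q := PySem.Int.floordiv (X - A * cock - B * (X - cock)) (1 - B * C) with hqdef
    have h := PySem.Int.floordiv_mul_add_mod (X - A * cock - B * (X - cock)) (1 - B * C)
    rw [hmod, add_zero, ← hqdef] at h
    have hchick : X - cock - hen = C * q := by rw [hhen]; ring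
    have hm : PySem.Int.mod (X - cock - hen) C = 0 :=
      (PySem.Int.mod_eq_zero_iff_dvd _ _).mpr ⟨q, hchick⟩
    have hfd : PySem.Int.floordiv (X - cock - hen) C = q := by
      rw [hchick]; exact pv_exact_div C q hC
    exact ⟨hm, by rw [hfd]; linear_combination h + B * hhen⟩

-- in the degenerate case C = 1 or C = -1 (B * C = 1) the condition is independent of hen
theorem pv_key_deg (A B C X cock hen : Int) (hd : B * C = 1) :
    (PySem.Int.mod (X - cock - hen) C = 0 ∧
      cock * A + hen * B + PySem.Int.floordiv (X - cock - hen) C = X)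
    ↔ A * cock + B * (X - cock) = X := by
  have hC : C = 1 ∨ C = -1 := Int.isUnit_iff.mp (isUnit_of_mul_isUnit_right (hd ▸ isUnit_one))
  have hB : B = C := by
    rcases hC with rfl | rfl <;> omega
  rcases hC with rfl | rfl
  · have hm : PySem.Int.mod (X - cock - hen) 1 = 0 :=
      (PySem.Int.mod_eq_zero_iff_dvd _ _).mpr (one_dvd _)
    have hfd : PySem.Int.floordiv (X - cock - hen) 1 = X - cock - hen := by
      simpa using pv_exact_div 1 (X - cock - hen) one_ne_zero
    subst hB
    constructor
    · rintro ⟨_, he⟩; rw [hfd] at he; linarith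
    · intro he; exact ⟨hm, by rw [hfd]; linarith⟩
  · have hm : PySem.Int.mod (X - cock - hen) (-1) = 0 :=
      (PySem.Int.mod_eq_zero_iff_dvd _ _).mpr ⟨-(X - cock - hen), by ring⟩
    have hfd : PySem.Int.floordiv (X - cock - hen) (-1) = -(X - cock - hen) := by
      have := pv_exact_div (-1) (-(X - cock - hen)) (by norm_num)
      simpa using this
    subst hB
    constructor
    · rintro ⟨_, he⟩; rw [hfd] at he; linarith
    · intro he; exact ⟨hm, by rw [hfd]; linarith⟩

-- per-cock: A's inner loop equals B's body, for C ≠ 0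
theorem pv_inner (A B C X cock : Int) (hC : C ≠ 0) (sols : List (Int × Int × Int)) :
    (PySem.List.pyRange 0 (X + 1 - cock) 1).foldl (fun solutions hen =>
      let chicks := X - cock - hen
      if PySem.Int.mod chicks C = 0 ∧ cock * A + hen * B + PySem.Int.floordiv chicks C = X
      then solutions ++ [(cock, hen, chicks)] else solutions) sols
    = (let n := X - cock
       let d := 1 - B * C
       if d ≠ 0 then
         let num := X - A * cock - B * n
         if PySem.Int.mod num d = 0 then
           let chicks := (PySem.Int.floordiv num d) * C
           if 0 ≤ chicks ∧ chicks ≤ n then sols ++ [(cock, n - chicks, chicks)] else sols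
         else sols
       else
         if A * cock + B * n = X then
           sols ++ (PySem.List.pyRange 0 (n + 1) 1).map (fun hen => (cock, hen, n - hen))
         else sols) := by
  rw [pv_foldl_app_ite
    (fun hen => PySem.Int.mod (X - cock - hen) C = 0 ∧
      cock * A + hen * B + PySem.Int.floordiv (X - cock - hen) C = X)
    (fun hen => (cock, hen, X - cock - hen))]
  simp only []
  set n := X - cock with hn
  have hrange : X + 1 - cock = n + 1 := by omega
  rw [hrange]
  by_cases hd : 1 - B * C ≠ 0
  · rw [if_pos hd]
    set q := PySem.Int.floordiv (X - A * cock - B * n) (1 - B * C) with hq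
    by_cases hg : PySem.Int.mod (X - A * cock - B * n) (1 - B * C) = 0 ∧ 0 ≤ q * C ∧ q * C ≤ n
    · rw [if_pos hg.1, if_pos ⟨hg.2.1, hg.2.2⟩]
      have hfil : (PySem.List.pyRange 0 (n + 1) 1).filter
          (fun hen => decide (PySem.Int.mod (X - cock - hen) C = 0 ∧
            cock * A + hen * B + PySem.Int.floordiv (X - cock - hen) C = X)) = [n - q * C] := by
        apply pv_filter_eq_singleton _ _ _ (PySem.List.nodup_pyRange_one 0 (n+1))
        · rw [PySem.List.mem_pyRange_one]; omega
        · intro x hx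
          rw [PySem.List.mem_pyRange_one] at hx
          simp only [decide_eq_true_eq]
          rw [pv_key A B C X cock x hC hd hx.1 (by omega)]
          constructor
          · rintro ⟨_, _, _, hxeq⟩; omega
          · rintro rfl; exact ⟨hg.1, hg.2.1, hg.2.2, rfl⟩
      rw [hfil]
      simp only [List.map_cons, List.map_nil]
      have h3 : X - cock - (n - q * C) = q * C := by rw [hn]; ring
      rw [h3]
    · have hfil : (PySem.List.pyRange 0 (n + 1) 1).filter
          (fun hen => decide (PySem.Int.mod (X - cock - hen) C = 0 ∧
            cock * A + hen * B + PySem.Int.floordiv (X - cock - hen) C = X)) = [] := by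
        rw [List.filter_eq_nil_iff]
        intro x hx hpx
        rw [PySem.List.mem_pyRange_one] at hx
        simp only [decide_eq_true_eq] at hpx
        rcases (pv_key A B C X cock x hC hd hx.1 (by omega)).mp hpx with ⟨hm, hlo, hhi, _⟩
        exact hg ⟨hm, hlo, hhi⟩
      rw [hfil]
      simp only [List.map_nil, List.append_nil]
      by_cases hm : PySem.Int.mod (X - A * cock - B * n) (1 - B * C) = 0
      · rw [if_pos hm, if_neg (by intro hb; exact hg ⟨hm, hb.1, hb.2⟩)]
      · rw [if_neg hm]
  · rw [if_neg hd]
    push_neg at hd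
    have hd' : B * C = 1 := by omega
    by_cases he : A * cock + B * n = X
    · rw [if_pos he]
      have hfil : (PySem.List.pyRange 0 (n + 1) 1).filter
          (fun hen => decide (PySem.Int.mod (X - cock - hen) C = 0 ∧
            cock * A + hen * B + PySem.Int.floordiv (X - cock - hen) C = X)) =
          PySem.List.pyRange 0 (n + 1) 1 := by
        rw [List.filter_eq_self]
        intro x _
        simp only [decide_eq_true_eq]
        exact (pv_key_deg A B C X cock x hd').mpr he
      rw [hfil]
    · rw [if_neg he]
      have hfil : (PySem.List.pyRange 0 (n + 1) 1).filter
          (fun hen => decide (PySem.Int.mod (X - cock - hen) C = 0 ∧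
            cock * A + hen * B + PySem.Int.floordiv (X - cock - hen) C = X)) = [] := by
        rw [List.filter_eq_nil_iff]
        intro x _ hpx
        simp only [decide_eq_true_eq] at hpx
        exact he ((pv_key_deg A B C X cock x hd').mp hpx)
      rw [hfil]
      simp

theorem pv_foldl_congr {α β : Type} (f g : β → α → β) :
    ∀ (l : List α) (acc : β), (∀ x ∈ l, ∀ s, f s x = g s x) →
      l.foldl f acc = l.foldl g acc := by
  intro l
  induction l with
  | nil => intro acc _; rfl
  | cons a t ih =>
    intro acc h
    simp only [List.foldl_cons]
    rw [h a (by simp) acc]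
    exact ih _ (fun x hx s => h x (by simp [hx]) s)

-- ===== VERDICT (by name: the statement is the Claim_ definition above) =====
theorem buy_chickens_spec : Claim_equal_buy_chickens := by
  intro A B C X _ hpre
  unfold Spec_buy_chickens buy_chickens buy_chickens_alt
  rcases hpre with hC | hX
  · exact pv_foldl_congr _ _ _ [] (fun cock _ s => pv_inner A B C X cock hC s)
  · have h : PySem.List.pyRange 0 (X + 1) 1 = [] := PySem.List.pyRange_one_eq_nil (by omega)
    rw [h]
    rfl
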